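-- pv_equiv track=rewrite | github.com/h4sh-basement/pypi-mirror-224 | packages/chalkpy/chalkpy-2.13.6-py3-none-any.whl/chalk/utils/collections.py | get_unique_item_or_none
-- ===== SOURCE A (Python) =====
-- from typing import Any, Dict, Iterable, List, Optional, Sequence, Set, Tuple, TypeVar, Union, cast, overload
--
-- T = TypeVar("T")
--
-- def get_unique_item_or_none(iterable: Iterable[Optional[T]]) -> Optional[T]:
--     item = None
--     for x in iterable:
--         if x is None:
--             continue
--         if item is not None:
--             raise ValueError(f"Multiple values not permitted. Found {item}, {x}")
--         item = x
--     return item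
-- ===== SOURCE B (Python) =====
-- def get_unique_item_or_none(iterable):
--     items = [x for x in iterable if x is not None]
--     if len(items) == 0:
--         return None
--     if len(items) == 1:
--         return items[0]
--     raise ValueError(f"Multiple values not permitted. Found {items[0]}, {items[1]}")
-- ===== Notes on version B (the rewrite author's own statement) =====
-- stated objective: simpler
-- what changed: Replaces the stateful early-exit scan over an Optional accumulator with a materialize-then-branch decomposition: filter the non-None items into a list once, then branch on its length.
import Mathlib
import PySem

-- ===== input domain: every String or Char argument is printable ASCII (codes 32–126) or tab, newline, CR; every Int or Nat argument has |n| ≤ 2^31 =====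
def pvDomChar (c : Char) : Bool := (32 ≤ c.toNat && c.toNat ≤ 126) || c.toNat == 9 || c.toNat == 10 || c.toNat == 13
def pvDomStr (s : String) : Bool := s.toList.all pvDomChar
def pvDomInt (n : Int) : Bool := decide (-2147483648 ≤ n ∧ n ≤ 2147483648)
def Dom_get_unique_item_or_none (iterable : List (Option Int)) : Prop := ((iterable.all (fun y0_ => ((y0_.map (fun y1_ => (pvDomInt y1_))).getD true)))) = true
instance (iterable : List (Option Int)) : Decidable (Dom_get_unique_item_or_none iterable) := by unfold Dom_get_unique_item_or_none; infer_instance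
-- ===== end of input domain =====

-- B replaces A's stateful early-exit scan with filter-then-branch-on-length; equal on every input where A returns (at most one non-None item).

-- ===== PORT A =====
-- the for-loop with 'item' accumulator; 'none' result = the ValueError raise (excluded by Pre_)
def pyLoopA : List (Option Int) → Option Int → Option (Option Int)
  | [], item => some item
  | x :: xs, item =>
    match x with
    | none => pyLoopA xs item            -- continue
    | some _ =>
      match item with
      | some _ => none                   -- raise ValueError
      | none => pyLoopA xs x             -- item = x
def get_unique_item_or_none (iterable : List (Option Int)) : Option Int :=
  (pyLoopA iterable none).getD none

-- ===== PORT B =====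
def get_unique_item_or_none_alt (iterable : List (Option Int)) : Option Int :=
  let items := iterable.filter (fun x => x.isSome)
  match items with
  | [] => none          -- len 0: return None
  | [y] => y            -- len 1: return items[0]
  | _ => none           -- len ≥ 2: B raises ValueError; excluded by Pre_

-- ===== PRECONDITION & SPEC =====
-- Pre_ excludes exactly the inputs with two or more non-None items, where both A and B raise ValueError.
def Pre_get_unique_item_or_none (iterable : List (Option Int)) : Prop :=
  (iterable.filter (fun x => x.isSome)).length ≤ 1
instance (iterable : List (Option Int)) : Decidable (Pre_get_unique_item_or_none iterable) := by
  unfold Pre_get_unique_item_or_none; infer_instance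
def pvWitness_get_unique_item_or_none : List (Option Int) := [none, some 7, none]
def Spec_get_unique_item_or_none (iterable : List (Option Int)) (out : Option Int) : Prop := out = get_unique_item_or_none_alt iterable
instance (iterable : List (Option Int)) (out : Option Int) : Decidable (Spec_get_unique_item_or_none iterable out) := by unfold Spec_get_unique_item_or_none; infer_instance

-- ===== CLAIM (what is proved, stated in full; the proofs are below) =====
def Claim_equal_get_unique_item_or_none : Prop := ∀ (iterable : List (Option Int)), Dom_get_unique_item_or_none iterable → Pre_get_unique_item_or_none iterable → Spec_get_unique_item_or_none iterable (get_unique_item_or_none iterable)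

-- ===== LEMMAS AND PROOFS =====

-- when no non-None item remains, the loop keeps its accumulator
theorem pyLoopA_keep (xs : List (Option Int)) (v : Int)
    (h : (xs.filter (fun x => x.isSome)).length = 0) :
    pyLoopA xs (some v) = some (some v) := by
  induction xs with
  | nil => rfl
  | cons x t ih =>
    cases x with
    | none => simpa [pyLoopA, List.filter] using ih (by simpa [List.filter] using h)
    | some a => simp [List.filter] at h

theorem pyLoopA_none (xs : List (Option Int))
    (h : (xs.filter (fun x => x.isSome)).length ≤ 1) :
    pyLoopA xs none = some (get_unique_item_or_none_alt xs) := by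
  induction xs with
  | nil => rfl
  | cons x t ih =>
    cases x with
    | none =>
      rw [show pyLoopA (none :: t) none = pyLoopA t none from rfl,
          ih (by simpa [List.filter] using h)]
      simp [get_unique_item_or_none_alt, List.filter]
    | some a =>
      have ht : (t.filter (fun x => x.isSome)).length = 0 := by
        have h2 : ((some a :: t).filter (fun x => x.isSome)).length = (t.filter (fun x => x.isSome)).length + 1 := by
          simp [List.filter]
        omega
      rw [show pyLoopA (some a :: t) none = pyLoopA t (some a) from rfl,
          pyLoopA_keep t a ht]
      have : t.filter (fun x => x.isSome) = [] := List.length_eq_zero_iff.mp ht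
      simp [get_unique_item_or_none_alt, List.filter, this]

-- ===== VERDICT (by name: the statement is the Claim_ definition above) =====
theorem get_unique_item_or_none_spec : Claim_equal_get_unique_item_or_none := by
  intro iterable _ hpre
  unfold Spec_get_unique_item_or_none get_unique_item_or_none
  rw [pyLoopA_none iterable hpre]
  rfl
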